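-- pv_equiv track=rewrite | github.com/facundotorraca/modelos-y-programacion-I | heur.py | _next_more_conflictive_attire
-- ===== SOURCE A (Python) =====
-- WASHED = 3
--
-- INCOMP = 4
--
-- def _next_more_conflictive_attire(attires):
--     more_conflictive_attire = None
--
--     #Find the first not washed attire
--     for attire in attires:
--         if not attire[WASHED]:
--             more_conflictive_attire = attire
--             break
--
--     for attire in attires:
--         if not attire[WASHED]:
--             if attire[INCOMP] >= more_conflictive_attire[INCOMP]:
--                 more_conflictive_attire = attire
--
--     return more_conflictive_attire;
-- ===== SOURCE B (Python) =====
-- WASHED = 3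
--
-- INCOMP = 4
--
-- def _next_more_conflictive_attire(attires):
--     # Staged value-then-position search: collect the unwashed attires,
--     # compute the maximal INCOMP value, then locate its LAST occurrence
--     # by index arithmetic on the reversed key list and index into the list.
--     candidates = [a for a in attires if not a[WASHED]]
--     if not candidates:
--         return None
--     keys = [a[INCOMP] for a in candidates]
--     m = max(keys)
--     i = len(keys) - 1 - keys[::-1].index(m)
--     return candidates[i]
-- ===== Notes on version B (the rewrite author's own statement) =====
-- stated objective: alternative
-- what changed: Replaces A's running-candidate argmax loop (find first unwashed, then replace-on->= scan) by a staged value-then-position search: filter the unwashed attires, compute the maximal INCOMP value with max(), locate its last occurrence via index arithmetic on the reversed key list, and index into the candidate list.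
import Mathlib
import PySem

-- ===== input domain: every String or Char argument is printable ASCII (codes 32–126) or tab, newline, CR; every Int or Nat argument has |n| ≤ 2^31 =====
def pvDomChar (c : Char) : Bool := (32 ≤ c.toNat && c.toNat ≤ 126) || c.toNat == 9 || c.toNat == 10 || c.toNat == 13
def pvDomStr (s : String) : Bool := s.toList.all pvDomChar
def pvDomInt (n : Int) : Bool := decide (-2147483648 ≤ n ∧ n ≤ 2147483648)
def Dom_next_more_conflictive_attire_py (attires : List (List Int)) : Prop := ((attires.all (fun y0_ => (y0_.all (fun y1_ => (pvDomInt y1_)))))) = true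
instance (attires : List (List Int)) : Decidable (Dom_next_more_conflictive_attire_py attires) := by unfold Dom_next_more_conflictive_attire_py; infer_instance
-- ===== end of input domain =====

-- B replaces A's running-candidate loop by a staged value-then-position search (same cost); return value only, no mutation.

-- ===== PORT A =====
-- first loop with break = List.find?; second loop = foldl replacing the candidate on `>=`.
-- (if no unwashed attire exists the second loop's branch never fires, so the result stays None)
def next_more_conflictive_attire_py (attires : List (List Int)) : Option (List Int) :=
  match attires.find? (fun a => PySem.List.pyGetD a 3 0 == 0) with
  | none => none
  | some m0 =>
      some (attires.foldl (fun m a =>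
        if PySem.List.pyGetD a 3 0 == 0 then
          if PySem.List.pyGetD m 4 0 ≤ PySem.List.pyGetD a 4 0 then a else m
        else m) m0)

-- ===== PORT B =====
-- candidates = filter; keys = map; m = max(keys); i = len-1 - keys[::-1].index(m); candidates[i]
-- (keys[::-1] is ported as keys.reverse — exact; max()/index() raise on empty/missing, so those
--  unreachable branches return none through the match)
def next_more_conflictive_attire_py_alt (attires : List (List Int)) : Option (List Int) :=
  let candidates := attires.filter (fun a => PySem.List.pyGetD a 3 0 == 0)
  match candidates with
  | [] => none
  | _ =>
    let keys := candidates.map (fun a => PySem.List.pyGetD a 4 0)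
    match PySem.List.max? keys (fun x => x) with
    | none => none
    | some m =>
      match PySem.List.index? keys.reverse m with
      | none => none
      | some j => PySem.List.pyGet? candidates ((keys.length : Int) - 1 - (j : Int))

-- ===== PRECONDITION & SPEC =====
-- Pre_ excludes exactly the inputs on which the Python A raises IndexError: an attire
-- shorter than 4 (attire[WASHED]) or an unwashed attire shorter than 5 (attire[INCOMP]).
def Pre_next_more_conflictive_attire_py (attires : List (List Int)) : Prop :=
  ∀ a ∈ attires, 4 ≤ a.length ∧ (PySem.List.pyGetD a 3 0 = 0 → 5 ≤ a.length)
instance (attires : List (List Int)) : Decidable (Pre_next_more_conflictive_attire_py attires) := by unfold Pre_next_more_conflictive_attire_py; infer_instance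

def pvWitness_next_more_conflictive_attire_py : List (List Int) :=
  [[1, 2, 3, 1], [0, 0, 0, 0, 7], [0, 0, 0, 0, 7], [0, 0, 0, 1, 9]]

def Spec_next_more_conflictive_attire_py (attires : List (List Int)) (out : Option (List Int)) : Prop := out = next_more_conflictive_attire_py_alt attires
instance (attires : List (List Int)) (out : Option (List Int)) : Decidable (Spec_next_more_conflictive_attire_py attires out) := by unfold Spec_next_more_conflictive_attire_py; infer_instance

-- ===== CLAIM (what is proved, stated in full; the proofs are below) =====
def Claim_equal_next_more_conflictive_attire_py : Prop := ∀ (attires : List (List Int)), Dom_next_more_conflictive_attire_py attires → Pre_next_more_conflictive_attire_py attires → Spec_next_more_conflictive_attire_py attires (next_more_conflictive_attire_py attires)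

-- ===== LEMMAS AND PROOFS =====

-- the INCOMP key
def pvKey (a : List Int) : Int := PySem.List.pyGetD a 4 0

-- A's inner replace-on-`>=` loop over the unwashed attires
def pvRun (m : List Int) (v : List (List Int)) : List Int :=
  List.foldl (fun m a => if PySem.List.pyGetD m 4 0 ≤ PySem.List.pyGetD a 4 0 then a else m) m v

lemma pvRun_cons (m x : List Int) (t : List (List Int)) :
    pvRun m (x :: t) = pvRun (if PySem.List.pyGetD m 4 0 ≤ PySem.List.pyGetD x 4 0 then x else m) t := rfl

-- A's second loop only acts on the unwashed attires
lemma pvA_fold (l : List (List Int)) (m0 : List Int) :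
    l.foldl (fun m a =>
        if PySem.List.pyGetD a 3 0 == 0 then
          if PySem.List.pyGetD m 4 0 ≤ PySem.List.pyGetD a 4 0 then a else m
        else m) m0
      = pvRun m0 (l.filter (fun a => PySem.List.pyGetD a 3 0 == 0)) := by
  induction l generalizing m0 with
  | nil => rfl
  | cons x s ih =>
      by_cases hx : PySem.List.pyGetD x 3 0 == 0
      · simp only [List.foldl_cons, List.filter_cons, hx, if_true]
        rw [pvRun_cons]
        exact ih _
      · simp only [List.foldl_cons, List.filter_cons, hx]
        exact ih m0

lemma pvFind?_eq_head?_filter (p : List Int → Bool) (l : List (List Int)) :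
    l.find? p = (l.filter p).head? := by
  induction l with
  | nil => rfl
  | cons x t ih =>
      by_cases hx : p x
      · simp only [List.find?_cons, List.filter_cons, hx, if_true, List.head?_cons]
      · simp only [List.find?_cons, List.filter_cons, hx, Bool.false_eq_true, if_false, ih]

-- the key of A's running maximum is the running max of the keys
lemma pvRun_key (t : List (List Int)) (h : List Int) :
    pvKey (pvRun h t) = (t.map pvKey).foldl max (pvKey h) := by
  induction t generalizing h with
  | nil => rfl
  | cons x s ih =>
      rw [pvRun_cons, List.map_cons, List.foldl_cons, ih]
      congr 1
      unfold pvKey PySem.List.pyGetD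
      split_ifs <;> omega

-- A's running maximum sits at a position after which every key is strictly smaller
lemma pvRun_decomp (t : List (List Int)) (h : List Int) :
    (pvRun h t = h ∧ ∀ a ∈ t, pvKey a < pvKey h) ∨
    (∃ P Q, t = P ++ pvRun h t :: Q ∧ ∀ a ∈ Q, pvKey a < pvKey (pvRun h t)) := by
  induction t generalizing h with
  | nil => exact Or.inl ⟨rfl, by simp⟩
  | cons x s ih =>
      rw [pvRun_cons]
      rcases ih (if PySem.List.pyGetD h 4 0 ≤ PySem.List.pyGetD x 4 0 then x else h) with
        ⟨heq, hlt⟩ | ⟨P, Q, hPQ, hlt⟩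
      · by_cases hc : PySem.List.pyGetD h 4 0 ≤ PySem.List.pyGetD x 4 0
        · refine Or.inr ⟨[], s, ?_, ?_⟩
          · simp only [hc, if_true] at heq ⊢; rw [heq]; rfl
          · intro a ha
            simp only [hc, if_true] at heq hlt ⊢
            rw [heq]; exact hlt a ha
        · refine Or.inl ⟨?_, ?_⟩
          · simp only [hc, if_false] at heq ⊢; exact heq
          · intro a ha
            simp only [hc, if_false] at heq hlt
            rcases List.mem_cons.mp ha with rfl | hmem
            · unfold pvKey; omega
            · exact hlt a hmem
      · exact Or.inr ⟨x :: P, Q, by rw [List.cons_append, ← hPQ], hlt⟩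

-- hence the whole list h::t splits around pvRun h t with strictly smaller keys after it
lemma pvRun_split (t : List (List Int)) (h : List Int) :
    ∃ P Q, h :: t = P ++ pvRun h t :: Q ∧ ∀ a ∈ Q, pvKey a < pvKey (pvRun h t) := by
  rcases pvRun_decomp t h with ⟨heq, hlt⟩ | ⟨P, Q, hPQ, hlt⟩
  · exact ⟨[], t, by rw [heq]; rfl, by rw [heq]; exact hlt⟩
  · exact ⟨h :: P, Q, by rw [List.cons_append, ← hPQ], hlt⟩

-- list.index on xs ++ v :: ys finds position xs.length when v is not in xs
lemma pvIndex?_append_cons {α : Type} [BEq α] [LawfulBEq α] (xs ys : List α) (v : α)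
    (h : v ∉ xs) : PySem.List.index? (xs ++ v :: ys) v = some xs.length := by
  induction xs with
  | nil => exact PySem.List.index?_cons_self v (ys)
  | cons x s ih =>
      have hx : x ≠ v := fun he => h (he ▸ List.mem_cons_self)
      rw [List.cons_append, PySem.List.index?_cons_of_ne _ hx,
        ih (fun hm => h (List.mem_cons_of_mem x hm))]
      rfl

-- ===== VERDICT (by name: the statement is the Claim_ definition above) =====
theorem next_more_conflictive_attire_py_spec : Claim_equal_next_more_conflictive_attire_py := by
  intro attires _ _
  unfold Spec_next_more_conflictive_attire_py
  unfold next_more_conflictive_attire_py next_more_conflictive_attire_py_alt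
  rw [pvFind?_eq_head?_filter]
  cases hU : attires.filter (fun a => PySem.List.pyGetD a 3 0 == 0) with
  | nil => rfl
  | cons h t =>
      simp only [List.head?_cons]
      rw [pvA_fold, hU, pvRun_cons, if_pos le_rfl]
      -- B side: keys, max, reversed index
      obtain ⟨P, Q, hPQ, hlt⟩ := pvRun_split t h
      have hkeys : (h :: t).map (fun a => PySem.List.pyGetD a 4 0)
          = P.map pvKey ++ pvKey (pvRun h t) :: Q.map pvKey := by
        rw [hPQ, List.map_append, List.map_cons]; rfl
      have hmax : PySem.List.max? ((h :: t).map (fun a => PySem.List.pyGetD a 4 0)) (fun x => x)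
          = some (pvKey (pvRun h t)) := by
        rw [List.map_cons, PySem.List.max?_id_cons, pvRun_key]; rfl
      have hrev : ((h :: t).map (fun a => PySem.List.pyGetD a 4 0)).reverse
          = (Q.map pvKey).reverse ++ pvKey (pvRun h t) :: (P.map pvKey).reverse := by
        rw [hkeys, List.reverse_append, List.reverse_cons, List.append_assoc]
        simp
      have hnotin : pvKey (pvRun h t) ∉ (Q.map pvKey).reverse := by
        intro hm
        rcases List.mem_map.mp (List.mem_reverse.mp hm) with ⟨a, ha, hk⟩
        have := hlt a ha; omega
      have hidx : PySem.List.index? ((h :: t).map (fun a => PySem.List.pyGetD a 4 0)).reverse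
          (pvKey (pvRun h t)) = some (Q.map pvKey).reverse.length := by
        rw [hrev]; exact pvIndex?_append_cons _ _ _ hnotin
      rw [hmax]
      simp only [hidx]
      have hlen : ((h :: t).map (fun a => PySem.List.pyGetD a 4 0)).length
          = P.length + 1 + Q.length := by
        rw [hkeys]; simp; omega
      have hidxval : (((h :: t).map (fun a => PySem.List.pyGetD a 4 0)).length : Int)
          - 1 - ((Q.map pvKey).reverse.length : Int) = (P.length : Int) := by
        rw [hlen]; simp; omega
      rw [hidxval, hPQ, PySem.List.pyGet?_append_length]
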